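-- pv_equiv track=rewrite | github.com/lapidshay/Diagnosis-of-software-networks-delays-and-failures | Staccato.py | remove_supersets
-- ===== SOURCE A (Python) =====
-- def not_superset(sut_sup: set, set_list: list):
-- 	# return True if sut_sup is not a superset of any element in set_list, False otherwise
-- 	return not any(sut_sup.issuperset(elem) for elem in set_list)
--
-- def remove_supersets(diags):
-- 	output = []
-- 	for diag in diags:
-- 		cur_diags = diags.copy()
-- 		cur_diags.remove(diag)
-- 		if not_superset(set(diag), cur_diags):
-- 			output.append(diag)
-- 	return output
-- ===== SOURCE B (Python) =====
-- def remove_supersets(diags):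
--     sets = [set(d) for d in diags]
--     order = sorted(range(len(diags)), key=lambda i: len(sets[i]))
--     out = []
--     for i, d in enumerate(diags):
--         ni = len(sets[i])
--         keep = True
--         for j in order:
--             if len(sets[j]) > ni:
--                 break
--             if j != i and sets[j] <= sets[i]:
--                 keep = False
--                 break
--         if keep:
--             out.append(d)
--     return out
-- ===== Notes on version B (the rewrite author's own statement) =====
-- stated objective: alternative
-- what changed: B precomputes all element sets once and, for each element, scans indices sorted by set size with an early break (a superset candidate must be no larger), instead of A's per-element list copy + remove + full superset rescan.
import Mathlib
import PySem

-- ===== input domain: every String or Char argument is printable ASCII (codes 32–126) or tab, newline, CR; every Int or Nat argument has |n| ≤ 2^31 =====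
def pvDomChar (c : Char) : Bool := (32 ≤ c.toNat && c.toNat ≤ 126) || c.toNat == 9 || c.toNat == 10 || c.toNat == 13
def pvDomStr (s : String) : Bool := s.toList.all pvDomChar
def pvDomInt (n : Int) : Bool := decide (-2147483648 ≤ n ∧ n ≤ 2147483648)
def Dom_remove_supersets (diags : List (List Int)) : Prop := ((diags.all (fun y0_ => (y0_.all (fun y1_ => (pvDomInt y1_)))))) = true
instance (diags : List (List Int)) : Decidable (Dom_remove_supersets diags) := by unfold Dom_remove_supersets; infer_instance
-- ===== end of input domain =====

-- B keeps each element iff no other (size-≤, thanks to a size-sorted index order with early break)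
-- element is a subset of it, one pass per element over precomputed sets; objective: alternative
-- decomposition avoiding A's per-element list copy/remove.

-- ===== PORT A =====
-- return True if sut_sup is not a superset of any element in set_list, False otherwise
def not_superset (sut_sup : PySem.Set Int) (set_list : List (List Int)) : Bool :=
  !(set_list.any (fun elem => PySem.Set.issuperset sut_sup elem))

-- 'cur_diags = diags.copy(); cur_diags.remove(diag)': diag is always a member of diags, so
-- remove? never returns none; '.getD []' is only a totality guard on that unreachable branch.
def remove_supersets (diags : List (List Int)) : List (List Int) :=
  diags.foldl (fun output diag =>
    let cur_diags := (PySem.List.remove? diags diag).getD []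
    if not_superset (PySem.Set.ofList diag) cur_diags then output ++ [diag] else output) []

-- ===== PORT B =====
-- inner 'for j in order: …' loop with its two breaks (size prune, subset hit)
def altScan (sets : List (PySem.Set Int)) (i : Int) (si : PySem.Set Int) : List Int → Bool
  | [] => true
  | j :: rest =>
      let sj := PySem.List.pyGetD sets j []
      if PySem.Set.len si < PySem.Set.len sj then true
      else if j ≠ i ∧ PySem.Set.issubset sj si = true then false
      else altScan sets i si rest

def remove_supersets_alt (diags : List (List Int)) : List (List Int) :=
  let sets : List (PySem.Set Int) := diags.map (fun d => PySem.Set.ofList d)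
  let order : List Int := PySem.List.sorted (PySem.List.pyRange 0 diags.length)
      (fun j => PySem.Set.len (PySem.List.pyGetD sets j []))
  (PySem.List.enumerate diags 0).foldl (fun out p =>
    if altScan sets p.1 (PySem.List.pyGetD sets p.1 []) order then out ++ [p.2] else out) []

-- ===== PRECONDITION & SPEC =====
def Spec_remove_supersets (diags : List (List Int)) (out : List (List Int)) : Prop := out = remove_supersets_alt diags
instance (diags : List (List Int)) (out : List (List Int)) : Decidable (Spec_remove_supersets diags out) := by unfold Spec_remove_supersets; infer_instance

-- ===== CLAIM (what is proved, stated in full; the proofs are below) =====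
def Claim_equal_remove_supersets : Prop := ∀ (diags : List (List Int)), Dom_remove_supersets diags → Spec_remove_supersets diags (remove_supersets diags)

-- ===== LEMMAS AND PROOFS =====

-- every entry B's pyGetD can produce from the precomputed set list is duplicate-free
theorem nodup_pyGetD_sets (xs : List (List Int)) (i : Int) :
    (PySem.List.pyGetD (xs.map PySem.Set.ofList) i []).Nodup := by
  unfold PySem.List.pyGetD PySem.List.pyGet?
  cases PySem.List.pyIdx? (xs.map PySem.Set.ofList).length i with
  | none => simp
  | some k =>
    cases h : xs[k]? with
    | none => simp [h]
    | some d => simp [h, PySem.Set.nodup_ofList]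

-- membership in a list with index r removed, by indices
theorem mem_eraseIdx_iff' {α : Type} {l : List α} {r : Nat} (hr : r < l.length) (e : α) :
    e ∈ l.eraseIdx r ↔ ∃ m, ∃ h : m < l.length, m ≠ r ∧ l[m] = e := by
  rw [List.mem_iff_getElem]
  constructor
  · rintro ⟨j, hj, hje⟩
    have hlen : (l.eraseIdx r).length = l.length - 1 := by
      simp [List.length_eraseIdx, hr]
    rw [List.getElem_eraseIdx] at hje
    split at hje
    · exact ⟨j, by omega, by omega, hje⟩
    · exact ⟨j + 1, by omega, by omega, hje⟩
  · rintro ⟨m, hm, hmr, hme⟩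
    have hlen : (l.eraseIdx r).length = l.length - 1 := by
      simp [List.length_eraseIdx, hr]
    by_cases h : m < r
    · refine ⟨m, by omega, ?_⟩
      rw [List.getElem_eraseIdx]
      simp [h, hme]
    · refine ⟨m - 1, by omega, ?_⟩
      rw [List.getElem_eraseIdx]
      have h1 : ¬ (m - 1 < r) := by omega
      simp only [h1, dite_false]
      have h2 : m - 1 + 1 = m := by omega
      simp [h2, hme]

-- B's pruned scan over a size-sorted index list decides "no index j ≠ i has sets[j] ⊆ si"
theorem scan_iff (sets : List (PySem.Set Int)) (i : Int) (si : PySem.Set Int)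
    (hnd : ∀ j : Int, (PySem.List.pyGetD sets j []).Nodup) :
    ∀ (order : List Int),
      order.Pairwise (fun a b =>
        PySem.Set.len (PySem.List.pyGetD sets a []) ≤ PySem.Set.len (PySem.List.pyGetD sets b [])) →
      (altScan sets i si order = true ↔
        ∀ j ∈ order, j = i ∨ ¬ (PySem.Set.issubset (PySem.List.pyGetD sets j []) si = true)) := by
  intro order
  induction order with
  | nil => simp [altScan]
  | cons j rest ih =>
    intro hp
    rw [List.pairwise_cons] at hp
    obtain ⟨hj, hrest⟩ := hp
    -- a subset of si has at most si's size (the scanned entries are duplicate-free),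
    -- so nothing at or after the size break can be a subset
    have hsub_len : ∀ j' : Int, PySem.Set.issubset (PySem.List.pyGetD sets j' []) si = true →
        PySem.Set.len (PySem.List.pyGetD sets j' []) ≤ PySem.Set.len si := by
      intro j' hs
      rw [PySem.Set.issubset_iff] at hs
      have := List.Subperm.length_le (List.subperm_of_subset (hnd j') hs)
      simp only [PySem.Set.len]
      exact_mod_cast this
    show (if PySem.Set.len si < PySem.Set.len (PySem.List.pyGetD sets j []) then true
      else if j ≠ i ∧ PySem.Set.issubset (PySem.List.pyGetD sets j []) si = true then false
      else altScan sets i si rest) = true ↔ _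
    by_cases hbreak : PySem.Set.len si < PySem.Set.len (PySem.List.pyGetD sets j [])
    · simp only [hbreak, if_pos, true_iff]
      intro j' hj'
      right
      intro hs
      have h1 := hsub_len j' hs
      have h2 : PySem.Set.len (PySem.List.pyGetD sets j []) ≤ PySem.Set.len (PySem.List.pyGetD sets j' []) := by
        rcases List.mem_cons.mp hj' with rfl | hmem
        · exact le_refl _
        · exact hj j' hmem
      omega
    · rw [if_neg hbreak]
      by_cases hhit : j ≠ i ∧ PySem.Set.issubset (PySem.List.pyGetD sets j []) si = true
      · rw [if_pos hhit]
        simp only [Bool.false_eq_true, false_iff]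
        intro hall
        rcases hall j List.mem_cons_self with rfl | hns
        · exact hhit.1 rfl
        · exact hns hhit.2
      · rw [if_neg hhit]
        rw [ih hrest]
        constructor
        · intro h j' hj'
          rcases List.mem_cons.mp hj' with rfl | hmem
          · by_cases hji : j' = i
            · exact Or.inl hji
            · exact Or.inr (fun hs => hhit ⟨hji, hs⟩)
          · exact h j' hmem
        · intro h j' hj'
          exact h j' (List.mem_cons_of_mem _ hj')

-- A's fold is a filter by A's per-element test
theorem foldA (diags : List (List Int)) : ∀ (xs : List (List Int)) (acc : List (List Int)),
    xs.foldl (fun output diag =>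
      let cur_diags := (PySem.List.remove? diags diag).getD []
      if not_superset (PySem.Set.ofList diag) cur_diags then output ++ [diag] else output) acc
    = acc ++ xs.filter (fun d => not_superset (PySem.Set.ofList d) ((PySem.List.remove? diags d).getD [])) := by
  intro xs
  induction xs with
  | nil => simp
  | cons x xs ih =>
    intro acc
    simp only [List.foldl_cons, List.filter_cons]
    by_cases h : not_superset (PySem.Set.ofList x) ((PySem.List.remove? diags x).getD []) = true
    · simp [h, ih]
    · simp only [Bool.not_eq_true] at h
      simp [h, ih]

-- B's fold over enumerate is a filter, once the index-wise test agrees with a value-wise one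
theorem foldB (sets : List (PySem.Set Int)) (order : List Int) (f : List Int → Bool) :
    ∀ (xs : List (List Int)) (s : Int) (acc : List (List Int)),
      (∀ p ∈ PySem.List.enumerate xs s,
        altScan sets p.1 (PySem.List.pyGetD sets p.1 []) order = f p.2) →
      (PySem.List.enumerate xs s).foldl (fun out p =>
        if altScan sets p.1 (PySem.List.pyGetD sets p.1 []) order then out ++ [p.2] else out) acc
      = acc ++ xs.filter f := by
  intro xs
  induction xs with
  | nil => simp [PySem.List.enumerate_nil]
  | cons x xs ih =>
    intro s acc H
    rw [PySem.List.enumerate_cons]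
    simp only [List.foldl_cons, List.filter_cons]
    have hx := H (s, x) (by rw [PySem.List.enumerate_cons]; exact List.mem_cons_self)
    have Hrest : ∀ p ∈ PySem.List.enumerate xs (s + 1),
        altScan sets p.1 (PySem.List.pyGetD sets p.1 []) order = f p.2 := by
      intro p hp
      exact H p (by rw [PySem.List.enumerate_cons]; exact List.mem_cons_of_mem _ hp)
    simp only at hx
    by_cases h : f x = true
    · rw [hx, h, if_pos rfl, ih (s + 1) (acc ++ [x]) Hrest]
      simp
    · simp only [Bool.not_eq_true] at h
      rw [hx, h]
      simp only [Bool.false_eq_true, if_false]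
      exact ih (s + 1) acc Hrest

-- the heart: at each index k, B's test equals A's test on the element diags[k]
theorem main_point (diags : List (List Int)) (k : Nat) (hk : k < diags.length) :
    altScan (diags.map (fun d => PySem.Set.ofList d)) (k : Int)
      (PySem.List.pyGetD (diags.map (fun d => PySem.Set.ofList d)) (k : Int) [])
      (PySem.List.sorted (PySem.List.pyRange 0 diags.length)
        (fun j => PySem.Set.len (PySem.List.pyGetD (diags.map (fun d => PySem.Set.ofList d)) j [])))
    = not_superset (PySem.Set.ofList diags[k]) ((PySem.List.remove? diags diags[k]).getD []) := by
  have hget : ∀ (m : Nat) (hm : m < diags.length),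
      PySem.List.pyGetD (diags.map (fun d => PySem.Set.ofList d)) (m : Int) [] = PySem.Set.ofList (diags[m]'hm) := by
    intro m hm
    rw [PySem.List.pyGetD_natCast]
    simp [List.getD_eq_getElem?_getD, hm]
  have hmem : diags[k] ∈ diags := List.getElem_mem hk
  have hrm : (PySem.List.remove? diags diags[k]).getD [] = diags.eraseIdx (diags.idxOf diags[k]) := by
    rw [PySem.List.remove?_eq_some_erase diags _ hmem, Option.getD_some,
      List.erase_eq_eraseIdx_of_idxOf rfl]
  have hr : diags.idxOf diags[k] < diags.length := List.idxOf_lt_length_of_mem hmem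
  have hdr : diags[diags.idxOf diags[k]] = diags[k] := List.getElem_idxOf hr
  rw [Bool.eq_iff_iff]
  rw [scan_iff _ _ _ (fun j => nodup_pyGetD_sets diags j) _
    (PySem.List.sorted_pairwise _ _)]
  -- A's test, by indices: no index other than idxOf's is a subset of diags[k]
  have hA : (not_superset (PySem.Set.ofList diags[k]) ((PySem.List.remove? diags diags[k]).getD []) = true)
      ↔ ∀ m, ∀ hm : m < diags.length, m ≠ diags.idxOf diags[k] →
          ¬ (∀ x ∈ diags[m]'hm, x ∈ diags[k]) := by
    rw [hrm]
    simp only [not_superset, Bool.not_eq_true', List.any_eq_false,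
      PySem.Set.issuperset_iff, PySem.Set.mem_ofList]
    constructor
    · intro h m hm hmr
      exact h diags[m] ((mem_eraseIdx_iff' hr _).mpr ⟨m, hm, hmr, rfl⟩)
    · intro h e he
      obtain ⟨m, hm, hmr, rfl⟩ := (mem_eraseIdx_iff' hr e).mp he
      exact h m hm hmr
  -- B's test, by indices: no index other than k itself is a subset of diags[k]
  have hB : (∀ j ∈ PySem.List.sorted (PySem.List.pyRange 0 diags.length)
        (fun j => PySem.Set.len (PySem.List.pyGetD (diags.map (fun d => PySem.Set.ofList d)) j [])),
        j = (k : Int) ∨ ¬ (PySem.Set.issubset (PySem.List.pyGetD (diags.map (fun d => PySem.Set.ofList d)) j [])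
          (PySem.List.pyGetD (diags.map (fun d => PySem.Set.ofList d)) (k : Int) []) = true))
      ↔ ∀ m, ∀ hm : m < diags.length, m = k ∨ ¬ (∀ x ∈ diags[m]'hm, x ∈ diags[k]) := by
    have hmemo : ∀ j : Int, (j ∈ PySem.List.sorted (PySem.List.pyRange 0 diags.length)
        (fun j => PySem.Set.len (PySem.List.pyGetD (diags.map (fun d => PySem.Set.ofList d)) j [])))
        ↔ (0 ≤ j ∧ j < (diags.length : Int)) := by
      intro j
      rw [(PySem.List.sorted_perm _ _ _).mem_iff, PySem.List.mem_pyRange_one]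
    constructor
    · intro h m hm
      have := h (m : Int) ((hmemo _).mpr ⟨by positivity, by exact_mod_cast hm⟩)
      rcases this with heq | hns
      · left; exact_mod_cast heq
      · right
        intro hsub
        apply hns
        rw [hget m hm, hget k hk, PySem.Set.issubset_iff]
        intro x hx
        rw [PySem.Set.mem_ofList] at hx ⊢
        exact hsub x hx
    · intro h j hj
      obtain ⟨hj0, hjn⟩ := (hmemo j).mp hj
      obtain ⟨m, rfl⟩ := Int.eq_ofNat_of_zero_le hj0
      have hm : m < diags.length := by exact_mod_cast hjn
      rcases h m hm with rfl | hns
      · left; rfl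
      · right
        intro hs
        apply hns
        rw [hget m hm, hget k hk, PySem.Set.issubset_iff] at hs
        intro x hx
        have := hs x (by rw [PySem.Set.mem_ofList]; exact hx)
        rw [PySem.Set.mem_ofList] at this
        exact this
  rw [hB, hA]
  -- index bookkeeping: idxOf points at an element equal to diags[k]
  by_cases hrk : diags.idxOf diags[k] = k
  · constructor
    · intro h m hm hmr
      rcases h m hm with rfl | hns
      · exact absurd hrk.symm hmr
      · exact hns
    · intro h m hm
      by_cases hmk : m = k
      · exact Or.inl hmk
      · exact Or.inr (h m hm (by rw [hrk]; exact hmk))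
  · apply iff_of_false
    · intro h
      rcases h (diags.idxOf diags[k]) hr with hrk' | hns
      · exact hrk hrk'
      · exact hns (fun x hx => by rw [hdr] at hx; exact hx)
    · intro h
      exact h k hk (fun he => hrk he.symm) (fun x hx => hx)

-- ===== VERDICT (by name: the statement is the Claim_ definition above) =====
theorem remove_supersets_spec : Claim_equal_remove_supersets := by
  intro diags _
  unfold Spec_remove_supersets remove_supersets remove_supersets_alt
  rw [foldA, foldB]
  intro p hp
  rw [PySem.List.mem_enumerate_iff] at hp
  obtain ⟨k, h, rfl⟩ := hp
  simpa using main_point diags k h
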